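-- pv_equiv track=rewrite | github.com/KMDMNAK/psWord | psWord/parse/owakati.py | getFrequency
-- ===== SOURCE A (Python) =====
-- from collections import defaultdict
--
-- def getFrequency(nonstop_words_documents,allword=True):
--     """
--         USED in getWordFrequency
--     """
--     frequency=[defaultdict(int) for w in range(len(nonstop_words_documents))]
--     for nostopword_document,each_frequency in zip(nonstop_words_documents,frequency):
--         for sentence in nostopword_document:
--             for word in sentence:
--                 each_frequency[word]+=1
--     if(allword):
--         frequency=convert2AllWordsFrequency(frequency)
--         frequency=sorted(frequency.items(),key=lambda x:-x[1])
--     return frequency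
--
-- def convert2AllWordsFrequency(frequencies):
--     """
--         this convert each document's frequency into all word frequency
--
--         Args
--         _____
--             each_frequency (2-D dict list)
--         _____
--
--     """
--     #{word1:count(int),word2:count(int)...}
--     frequency={}
--     for each_frequency in frequencies:
--         for each_key in each_frequency.keys():
--             isEmpty=(frequency.get(each_key)==None)
--             if(isEmpty):
--                 frequency[each_key]=each_frequency[each_key]
--                 continue
--             frequency[each_key]+=each_frequency[each_key]
--     return frequency
-- ===== SOURCE B (Python) =====
-- from collections import Counter
--
-- def getFrequency(nonstop_words_documents, allword=True):
--     if allword: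
--         # one fused pass over all words: Counter keeps first-encounter insertion
--         # order, so the stable sort breaks ties exactly as A's merge does
--         counts = Counter(w for doc in nonstop_words_documents
--                            for sentence in doc
--                            for w in sentence)
--         return sorted(counts.items(), key=lambda x: -x[1])
--     # per-document tables (A returns defaultdicts here, == equal to these Counters)
--     return [Counter(w for sentence in doc for w in sentence)
--             for doc in nonstop_words_documents]
-- ===== Notes on version B (the rewrite author's own statement) =====
-- stated objective: simpler
-- what changed: B drops A's per-document defaultdict tables and separate merge pass: one fused Counter over all words (first-encounter insertion order preserves A's tie-break) followed by the same stable sort; the allword=False branch returns per-document Counters (==-equal to A's defaultdicts) but is excluded by Pre_ because that value is a list of dicts, not a list of (word,count) pairs of the declared return type.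
-- outside the precondition, e.g. on getFrequency([[['a', 'b'], ['a']]], False): A returns [{'a': 2, 'b': 1}], B returns [{'a': 2, 'b': 1}]
import Mathlib
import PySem

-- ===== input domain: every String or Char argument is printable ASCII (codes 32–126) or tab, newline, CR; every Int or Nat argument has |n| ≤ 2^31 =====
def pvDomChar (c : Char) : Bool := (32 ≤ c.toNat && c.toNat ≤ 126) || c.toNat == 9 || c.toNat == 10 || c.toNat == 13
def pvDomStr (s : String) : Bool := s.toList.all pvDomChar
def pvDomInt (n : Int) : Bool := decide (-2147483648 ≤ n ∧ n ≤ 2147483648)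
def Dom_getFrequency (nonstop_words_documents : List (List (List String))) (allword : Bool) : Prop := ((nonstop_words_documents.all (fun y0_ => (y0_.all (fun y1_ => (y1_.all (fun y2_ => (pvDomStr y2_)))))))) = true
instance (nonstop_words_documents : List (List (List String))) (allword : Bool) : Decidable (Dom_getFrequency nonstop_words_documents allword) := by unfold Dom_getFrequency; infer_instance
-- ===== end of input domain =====

-- B replaces A's per-document defaultdict tables + separate merge pass by one fused
-- Counter over all words followed by the same stable sort (objective: simpler).

-- ===== PORT A =====
def convert2AllWordsFrequency (frequencies : List (PySem.Dict String Int)) : PySem.Dict String Int :=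
  frequencies.foldl (fun frequency each_frequency =>
    each_frequency.keys.foldl (fun frequency each_key =>
      let isEmpty := frequency.get? each_key == none
      if isEmpty then frequency.insert each_key (each_frequency.getD each_key 0)
      else frequency.insert each_key (frequency.getD each_key 0 + each_frequency.getD each_key 0))
      frequency)
    PySem.Dict.empty

def getFrequency (nonstop_words_documents : List (List (List String))) (allword : Bool) : List (String × Int) :=
  -- [defaultdict(int) for w in range(len(...))]
  let frequency := (PySem.List.pyRange 0 (nonstop_words_documents.length : Int) 1).map
    (fun _ => (PySem.Dict.empty : PySem.Dict String Int))
  -- the zip loop mutates each fresh dict in place; modelled as mapping each (doc, dict) pair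
  let frequency := (nonstop_words_documents.zip frequency).map (fun p =>
    p.1.foldl (fun each_frequency sentence =>
      sentence.foldl (fun each_frequency word => each_frequency.modify word 0 (· + 1)) each_frequency) p.2)
  if allword then
    PySem.List.sorted (convert2AllWordsFrequency frequency).items (fun x => -x.2) false
  else
    -- Python returns the per-document dict list here, not a value of the declared
    -- return type list[tuple[str,int]]; excluded by Pre_getFrequency
    []

-- ===== PORT B =====
def getFrequency_alt (nonstop_words_documents : List (List (List String))) (allword : Bool) : List (String × Int) :=
  if allword then
    let counts := PySem.Dict.counter
      (nonstop_words_documents.flatMap (fun doc => doc.flatMap (fun sentence => sentence)))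
    PySem.List.sorted counts.items (fun x => -x.2) false
  else
    -- B's Python returns per-document Counters here, not a value of the declared
    -- return type; excluded by Pre_getFrequency
    []

-- ===== PRECONDITION & SPEC =====
-- Pre_ excludes allword = False, on which A returns a list of per-document dicts —
-- not a value of the declared return type list[tuple[str,int]].
def Pre_getFrequency (nonstop_words_documents : List (List (List String))) (allword : Bool) : Prop :=
  allword = true
instance (nonstop_words_documents : List (List (List String))) (allword : Bool) : Decidable (Pre_getFrequency nonstop_words_documents allword) := by unfold Pre_getFrequency; infer_instance

def pvWitness_getFrequency : List (List (List String)) × Bool := ([[["a", "b"], ["a"]]], true)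

def Spec_getFrequency (nonstop_words_documents : List (List (List String))) (allword : Bool) (out : List (String × Int)) : Prop := out = getFrequency_alt nonstop_words_documents allword
instance (nonstop_words_documents : List (List (List String))) (allword : Bool) (out : List (String × Int)) : Decidable (Spec_getFrequency nonstop_words_documents allword out) := by unfold Spec_getFrequency; infer_instance

-- ===== CLAIM (what is proved, stated in full; the proofs are below) =====
def Claim_equal_getFrequency : Prop := ∀ (nonstop_words_documents : List (List (List String))) (allword : Bool), Dom_getFrequency nonstop_words_documents allword → Pre_getFrequency nonstop_words_documents allword → Spec_getFrequency nonstop_words_documents allword (getFrequency nonstop_words_documents allword)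

-- ===== LEMMAS AND PROOFS =====

-- proof-only abbreviations: A's per-document counting dict, A's merge step with the
-- two branches fused into a single insert, and the fused word list B counts over
def pvCnt (doc : List (List String)) : PySem.Dict String Int :=
  PySem.Dict.counter (doc.flatMap (fun s => s))

def pvMergeFn (a c : PySem.Dict String Int) : PySem.Dict String Int :=
  c.keys.foldl (fun d k => d.insert k (d.getD k 0 + c.getD k 0)) a

def pvAllWords (docs : List (List (List String))) : List String :=
  docs.flatMap (fun doc => doc.flatMap (fun sentence => sentence))

-- A's two merge branches insert the same combined value (get? = none means getD = 0)
theorem pv_merge_step_eq (c : PySem.Dict String Int) (l : List String) (a : PySem.Dict String Int) :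
    l.foldl (fun frequency each_key =>
      let isEmpty := frequency.get? each_key == none
      if isEmpty then frequency.insert each_key (c.getD each_key 0)
      else frequency.insert each_key (frequency.getD each_key 0 + c.getD each_key 0)) a
    = l.foldl (fun frequency k => frequency.insert k (frequency.getD k 0 + c.getD k 0)) a := by
  have hf : (fun (frequency : PySem.Dict String Int) (each_key : String) =>
      let isEmpty := frequency.get? each_key == none
      if isEmpty then frequency.insert each_key (c.getD each_key 0)
      else frequency.insert each_key (frequency.getD each_key 0 + c.getD each_key 0))
      = fun frequency k => frequency.insert k (frequency.getD k 0 + c.getD k 0) := by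
    funext d k
    rcases h : d.get? k with _ | v
    · simp [h, PySem.Dict.getD_eq_get?_getD]
    · simp
  rw [hf]

-- value accumulated by the fused merge fold
theorem pv_merge_getD (w : String → Int) (l : List String) (a : PySem.Dict String Int) (x : String) :
    (l.foldl (fun d k => d.insert k (d.getD k 0 + w k)) a).getD x 0
      = a.getD x 0 + (l.count x : Int) * w x := by
  induction l generalizing a with
  | nil => simp
  | cons k t ih =>
    simp only [List.foldl_cons, ih, PySem.Dict.getD_insert, List.count_cons]
    by_cases hx : x = k
    · subst hx; simp; ring
    · simp only [if_neg hx]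
      have : ¬(k = x) := fun h => hx h.symm
      simp [this]

theorem pv_update_ofList (s : PySem.Set String) (ws : List String) :
    PySem.Set.update s (PySem.Set.ofList ws) = PySem.Set.update s ws := by
  rw [PySem.Set.update_eq_append_filter, PySem.Set.update_eq_append_filter, PySem.Set.ofList_ofList]

-- invariant of A's merge pass over the per-document counting dicts:
-- keys in first-appearance order, unique, values the running word counts
theorem pv_merge_fold (docs : List (List (List String))) :
    ∀ (a : PySem.Dict String Int), a.keys.Nodup →
      ((docs.map pvCnt).foldl pvMergeFn a).keys = PySem.Set.update a.keys (pvAllWords docs)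
      ∧ ((docs.map pvCnt).foldl pvMergeFn a).keys.Nodup
      ∧ ∀ x, ((docs.map pvCnt).foldl pvMergeFn a).getD x 0
            = a.getD x 0 + ((pvAllWords docs).count x : Int) := by
  induction docs with
  | nil => intro a h; simp [pvAllWords, PySem.Set.update_nil, h]
  | cons doc rest ih =>
    intro a h
    set ws := doc.flatMap (fun s => s) with hws
    have hkeysc : (pvCnt doc).keys = PySem.Set.ofList ws := PySem.Dict.keys_counter _
    have hkeys1 : (pvMergeFn a (pvCnt doc)).keys = PySem.Set.update a.keys ws := by
      unfold pvMergeFn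
      rw [PySem.Dict.keys_foldl_insert, hkeysc, pv_update_ofList]
    have hnd1 : (pvMergeFn a (pvCnt doc)).keys.Nodup :=
      PySem.Dict.nodup_keys_foldl_insert _ _ _ h
    have hgetD1 : ∀ x, (pvMergeFn a (pvCnt doc)).getD x 0 = a.getD x 0 + (ws.count x : Int) := by
      intro x
      unfold pvMergeFn
      rw [pv_merge_getD]
      by_cases hx : x ∈ ws
      · rw [hkeysc, List.count_eq_one_of_mem (PySem.Set.nodup_ofList _) ((PySem.Set.mem_ofList _ _).mpr hx)]
        show a.getD x 0 + (1 : Int) * (pvCnt doc).getD x 0 = _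
        unfold pvCnt
        rw [PySem.Dict.getD_counter]
        ring
      · have h1 : x ∉ (pvCnt doc).keys := by
          rw [hkeysc]; exact fun hm => hx ((PySem.Set.mem_ofList _ _).mp hm)
        rw [List.count_eq_zero.mpr h1, List.count_eq_zero.mpr hx]
        simp
    obtain ⟨k2, n2, g2⟩ := ih (pvMergeFn a (pvCnt doc)) hnd1
    have hall : pvAllWords (doc :: rest) = ws ++ pvAllWords rest := by
      simp [pvAllWords, hws]
    refine ⟨?_, ?_, ?_⟩
    · rw [List.map_cons, List.foldl_cons, k2, hkeys1, hall, PySem.Set.update_append]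
    · rw [List.map_cons, List.foldl_cons]; exact n2
    · intro x
      rw [List.map_cons, List.foldl_cons, g2, hgetD1, hall, List.count_append]
      push_cast; ring

theorem pv_zip_rep {α β γ : Type} (e : β) (f : α × β → γ) :
    ∀ (xs : List α), ((xs.zip (List.replicate xs.length e)).map f) = xs.map (fun x => f (x, e)) := by
  intro xs; induction xs with
  | nil => rfl
  | cons h t ih => simp [List.replicate_succ, ih]

-- A's nested counting loop over one document is the counter of its flattened words
theorem pv_cnt_eq (doc : List (List String)) :
    doc.foldl (fun d sentence =>
      sentence.foldl (fun d word => d.modify word 0 (· + 1)) d) PySem.Dict.empty = pvCnt doc := by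
  unfold pvCnt
  rw [PySem.Dict.counter_eq_foldl]
  rw [show doc.flatMap (fun s => s) = doc.flatten by simp]
  rw [List.foldl_flatten]

-- A's zip-with-fresh-empties loop builds exactly one counting dict per document
theorem pv_zip_empties (docs : List (List (List String))) :
    (docs.zip ((PySem.List.pyRange 0 (docs.length : Int) 1).map
        (fun _ => (PySem.Dict.empty : PySem.Dict String Int)))).map (fun p =>
      p.1.foldl (fun d sentence =>
        sentence.foldl (fun d word => d.modify word 0 (· + 1)) d) p.2)
    = docs.map pvCnt := by
  rw [List.map_const']
  have hlen : (PySem.List.pyRange 0 (docs.length : Int) 1).length = docs.length := by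
    simp [pysem]
  rw [hlen, pv_zip_rep]
  exact List.map_congr_left (fun doc _ => pv_cnt_eq doc)

-- A's merged dictionary is B's Counter of the fused word list
theorem pv_merged_eq_counter (docs : List (List (List String))) :
    convert2AllWordsFrequency (docs.map pvCnt) = PySem.Dict.counter (pvAllWords docs) := by
  unfold convert2AllWordsFrequency
  have hfn : (fun (frequency each_frequency : PySem.Dict String Int) =>
      each_frequency.keys.foldl (fun frequency each_key =>
        let isEmpty := frequency.get? each_key == none
        if isEmpty then frequency.insert each_key (each_frequency.getD each_key 0)
        else frequency.insert each_key (frequency.getD each_key 0 + each_frequency.getD each_key 0))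
        frequency) = pvMergeFn := by
    funext a c
    exact pv_merge_step_eq c c.keys a
  rw [hfn]
  obtain ⟨hk, hn, hg⟩ := pv_merge_fold docs PySem.Dict.empty (by simp)
  apply PySem.Dict.ext
  rw [PySem.Dict.items_eq_map_keys _ hn 0, PySem.Dict.items_counter, hk]
  have hkeys : PySem.Set.update (PySem.Dict.empty : PySem.Dict String Int).keys (pvAllWords docs)
      = PySem.Set.ofList (pvAllWords docs) := by
    simp [PySem.Set.update_nil_left]
  rw [hkeys]
  refine List.map_congr_left (fun k _ => ?_)
  rw [hg k]
  simp

-- ===== VERDICT (by name: the statement is the Claim_ definition above) =====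
theorem getFrequency_spec : Claim_equal_getFrequency := by
  intro docs allword _ hpre
  unfold Spec_getFrequency getFrequency getFrequency_alt
  subst hpre
  simp only [pv_zip_empties, pv_merged_eq_counter]
  rfl
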